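-- pv_equiv track=rewrite | github.com/adeepak7/stepik_bioinformatics_specialization_solutions | finding_hidden_messages_in_dna/finding_hidden_messages_in_dna/skew_value.py | find_skew_value
-- ===== SOURCE A (Python) =====
-- def find_skew_value(text):
--
--     length_of_text = len(text)
--
--     skew_value = 0
--     skew_value_list = []
--
--     for i in range(0, length_of_text):
--
--         if text[i] == 'C':
--             skew_value = skew_value - 1
--         elif text[i] == 'G':
--             skew_value = skew_value + 1
--
--         skew_value_list.append(skew_value)
--
--     return text, skew_value_list
-- ===== SOURCE B (Python) =====
-- def find_skew_value(text):
--     # Event-based run-length construction: the skew value only changes at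
--     # 'G'/'C' positions, so jump from event to event and emit the constant
--     # run of values between consecutive events as a block.
--     skew_value_list = []
--     value = 0
--     last = 0
--     for i, ch in enumerate(text):
--         if ch == 'G' or ch == 'C':
--             skew_value_list.extend([value] * (i - last))
--             value += 1 if ch == 'G' else -1
--             last = i
--     skew_value_list.extend([value] * (len(text) - last))
--     return text, skew_value_list
-- ===== Notes on version B (the rewrite author's own statement) =====
-- stated objective: alternative
-- what changed: B builds the skew list as run-length blocks: it tracks only the 'G'/'C' event positions and emits each constant stretch between events with one list.extend of a replicated block, instead of A's per-character accumulator update and append.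
import Mathlib
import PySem

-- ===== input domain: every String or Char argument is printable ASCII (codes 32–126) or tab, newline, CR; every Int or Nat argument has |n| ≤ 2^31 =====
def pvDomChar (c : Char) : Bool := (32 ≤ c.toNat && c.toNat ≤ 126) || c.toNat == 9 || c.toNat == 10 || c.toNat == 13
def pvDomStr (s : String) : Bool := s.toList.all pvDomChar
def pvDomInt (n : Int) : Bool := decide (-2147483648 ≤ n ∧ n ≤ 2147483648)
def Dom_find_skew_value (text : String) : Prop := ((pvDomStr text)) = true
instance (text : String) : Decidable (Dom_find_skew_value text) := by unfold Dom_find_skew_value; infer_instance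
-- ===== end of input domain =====

-- B builds the skew list as run-length blocks between 'G'/'C' events instead of A's per-character accumulator (alternative algorithm, same cost).

-- ===== PORT A =====
-- A's loop: one accumulator, updated and appended once per character.
def find_skew_value (text : String) : String × List Int :=
  let r := text.toList.foldl
    (fun (st : Int × List Int) c =>
      let s := if c = 'C' then st.1 - 1 else if c = 'G' then st.1 + 1 else st.1
      (s, st.2 ++ [s]))
    (0, [])
  (text, r.2)

-- ===== PORT B =====
-- B's loop over (index, char) pairs: state (value, last, skew), emitting a
-- replicated block only at 'G'/'C' events (list.extend of [value] * (i - last)).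
def pvGo : List Char → Nat → Int → Nat → List Int → (Int × Nat × List Int)
  | [], _, v, last, skew => (v, last, skew)
  | c :: cs, i, v, last, skew =>
    if c = 'G' ∨ c = 'C' then
      pvGo cs (i + 1) (if c = 'G' then v + 1 else v - 1) i
        (skew ++ List.replicate (i - last) v)
    else
      pvGo cs (i + 1) v last skew

def find_skew_value_alt (text : String) : String × List Int :=
  let cs := text.toList
  let r := pvGo cs 0 0 0 []
  (text, r.2.2 ++ List.replicate (cs.length - r.2.1) r.1)

-- ===== PRECONDITION & SPEC =====
def Spec_find_skew_value (text : String) (out : String × List Int) : Prop := out = find_skew_value_alt text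
instance (text : String) (out : String × List Int) : Decidable (Spec_find_skew_value text out) := by unfold Spec_find_skew_value; infer_instance

-- ===== CLAIM (what is proved, stated in full; the proofs are below) =====
def Claim_equal_find_skew_value : Prop := ∀ (text : String), Dom_find_skew_value text → Spec_find_skew_value text (find_skew_value text)

-- ===== LEMMAS AND PROOFS =====
-- Invariant: running A's fold with accumulator already flushed up to `last`
-- (i.e. acc = skew ++ replicate (i - last) v) yields the same list as flushing
-- B's final state.
theorem pv_inv (l : List Char) (i last : Nat) (v : Int) (skew : List Int)
    (h : last ≤ i) :
    (l.foldl
      (fun (st : Int × List Int) c =>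
        let s := if c = 'C' then st.1 - 1 else if c = 'G' then st.1 + 1 else st.1
        (s, st.2 ++ [s]))
      (v, skew ++ List.replicate (i - last) v))
    = ((pvGo l i v last skew).1,
       (pvGo l i v last skew).2.2 ++
         List.replicate ((i + l.length) - (pvGo l i v last skew).2.1)
           (pvGo l i v last skew).1)
    ∧ (pvGo l i v last skew).2.1 ≤ i + l.length := by
  induction l generalizing i last v skew with
  | nil => simp [pvGo, h]
  | cons c cs ih =>
      by_cases hG : c = 'G'
      · subst hG
        have H := ih (i + 1) i (v + 1) (skew ++ List.replicate (i - last) v)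
          (Nat.le_succ i)
        have h1 : i + 1 - i = 1 := by omega
        rw [h1] at H
        have h2 : i + ('G' :: cs).length = i + 1 + cs.length := by
          simp; omega
        simp only [List.foldl, pvGo, h2]
        norm_num
        simp only [List.replicate_one] at H
        simp only [List.append_assoc] at H ⊢
        constructor
        · rw [← H.1]; try simp
        · have := H.2; simp; omega
      · by_cases hC : c = 'C'
        · subst hC
          have H := ih (i + 1) i (v - 1) (skew ++ List.replicate (i - last) v)
            (Nat.le_succ i)
          have h1 : i + 1 - i = 1 := by omega
          rw [h1] at H
          have h2 : i + ('C' :: cs).length = i + 1 + cs.length := by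
            simp; omega
          simp only [List.foldl, pvGo, h2]
          norm_num
          rw [if_neg (show ¬ ('C' : Char) = 'G' from by decide)]
          simp only [List.replicate_one] at H
          simp only [List.append_assoc] at H ⊢
          constructor
          · rw [← H.1]; try simp
          · have := H.2; simp; try omega
        · have H := ih (i + 1) last v skew (Nat.le_trans h (Nat.le_succ i))
          have h1 : i + 1 - last = (i - last) + 1 := by omega
          rw [h1, List.replicate_succ'] at H
          have h2 : i + (c :: cs).length = i + 1 + cs.length := by
            simp; omega
          have hni : ¬ (c = 'G' ∨ c = 'C') := by simp [hG, hC]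
          simp only [List.foldl, pvGo, h2, if_neg hni, if_neg hG, if_neg hC]
          simp only [List.append_assoc] at H ⊢
          exact H

-- ===== VERDICT (by name: the statement is the Claim_ definition above) =====
theorem find_skew_value_spec : Claim_equal_find_skew_value := by
  intro text _
  unfold Spec_find_skew_value find_skew_value find_skew_value_alt
  have h := pv_inv text.toList 0 0 0 [] (le_refl 0)
  simp only [Nat.sub_self, List.replicate_zero, List.nil_append, Nat.zero_add] at h
  simp only [h.1]
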